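-- pv_equiv track=rewrite | github.com/Tristanpz/PSC-INF11 | reseauPytorch.py | act_to_binaire
-- ===== SOURCE A (Python) =====
-- def act_to_binaire(activation):
--     ''' entrée : un état d'activation
--         sortie : un entier représentant cet état en binaire'''
--     res=0
--     mult=0
--     for couche in activation:
--         for neurone in couche:
--             if neurone==1:
--                 res+=2**mult
--             mult+=1
--     return res
-- ===== SOURCE B (Python) =====
-- def act_to_binaire(activation):
--     ''' entrée : un état d'activation
--         sortie : un entier représentant cet état en binaire'''
--     res = 0
--     for couche in reversed(activation):
--         for neurone in reversed(couche):
--             res = res * 2 + (1 if neurone == 1 else 0)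
--     return res
-- ===== Notes on version B (the rewrite author's own statement) =====
-- stated objective: alternative
-- what changed: Replaces the per-position 2**mult power accumulation with Horner's method: iterate over the neurons in reverse and fold each bit into a single accumulator by doubling, with no exponent counter or power computation.
import Mathlib
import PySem

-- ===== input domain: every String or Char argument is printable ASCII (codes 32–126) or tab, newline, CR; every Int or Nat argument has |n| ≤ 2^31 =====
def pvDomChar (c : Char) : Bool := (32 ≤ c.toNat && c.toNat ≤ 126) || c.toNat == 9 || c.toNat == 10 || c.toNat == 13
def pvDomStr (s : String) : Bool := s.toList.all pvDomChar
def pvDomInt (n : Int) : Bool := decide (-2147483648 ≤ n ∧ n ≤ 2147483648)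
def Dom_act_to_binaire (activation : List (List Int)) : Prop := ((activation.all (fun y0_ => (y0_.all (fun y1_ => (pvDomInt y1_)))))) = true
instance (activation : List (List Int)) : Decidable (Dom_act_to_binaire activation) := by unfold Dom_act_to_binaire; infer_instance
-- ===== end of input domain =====

-- B replaces A's per-position 2**mult accumulation by Horner's method over the reversed
-- flattened neuron sequence (alternative decomposition, no power computation).

-- ===== PORT A =====
-- state: (res, mult); mult only ever counts up from 0, so it is a Nat
def act_to_binaire (activation : List (List Int)) : Int :=
  (activation.foldl
    (fun st couche =>
      couche.foldl
        (fun st neurone =>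
          ((if neurone == 1 then st.1 + 2 ^ st.2 else st.1), st.2 + 1))
        st)
    ((0 : Int), (0 : Nat))).1

-- ===== PORT B =====
def act_to_binaire_alt (activation : List (List Int)) : Int :=
  activation.reverse.foldl
    (fun res couche =>
      couche.reverse.foldl
        (fun res neurone => res * 2 + (if neurone == 1 then 1 else 0))
        res)
    0

-- ===== PRECONDITION & SPEC =====
def Spec_act_to_binaire (activation : List (List Int)) (out : Int) : Prop := out = act_to_binaire_alt activation
instance (activation : List (List Int)) (out : Int) : Decidable (Spec_act_to_binaire activation out) := by unfold Spec_act_to_binaire; infer_instance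

-- ===== CLAIM (what is proved, stated in full; the proofs are below) =====
def Claim_equal_act_to_binaire : Prop := ∀ (activation : List (List Int)), Dom_act_to_binaire activation → Spec_act_to_binaire activation (act_to_binaire activation)

-- ===== LEMMAS AND PROOFS =====

-- the Horner value of a flat bit list (bit at index 0 is least significant)
def pvHorner (l : List Int) : Int :=
  l.foldr (fun neurone acc => 2 * acc + (if neurone == 1 then 1 else 0)) 0

-- A's inner step
def pvStepA (st : Int × Nat) (neurone : Int) : Int × Nat :=
  ((if neurone == 1 then st.1 + 2 ^ st.2 else st.1), st.2 + 1)

theorem pvStepA_foldl (l : List Int) (res : Int) (mult : Nat) :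
    l.foldl pvStepA (res, mult) = (res + 2 ^ mult * pvHorner l, mult + l.length) := by
  induction l generalizing res mult with
  | nil => simp [pvHorner]
  | cons n t ih =>
      simp only [List.foldl_cons, pvStepA, pvHorner, List.foldr_cons, ih, Prod.mk.injEq]
      refine ⟨?_, by simp; omega⟩
      rw [pow_succ]
      split <;> ring

theorem A_eq_horner (activation : List (List Int)) :
    act_to_binaire activation = pvHorner activation.flatten := by
  show (activation.foldl (fun st couche => couche.foldl pvStepA st) ((0 : Int), (0 : Nat))).1 = _
  rw [← List.foldl_flatten, pvStepA_foldl]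
  simp

theorem B_eq_horner (activation : List (List Int)) :
    act_to_binaire_alt activation = pvHorner activation.flatten := by
  unfold act_to_binaire_alt
  induction activation with
  | nil => simp [pvHorner]
  | cons c t ih =>
      simp only [List.reverse_cons, List.foldl_append, List.flatten_cons]
      rw [ih]
      -- now: foldl over c.reverse starting from pvHorner t.flatten = pvHorner (c ++ t.flatten)
      induction c with
      | nil => simp
      | cons n ct ihc =>
          simp only [List.reverse_cons, List.foldl_append, List.cons_append, pvHorner,
            List.foldr_cons, List.foldl_cons, List.foldl_nil] at *
          rw [ihc]
          ring

-- ===== VERDICT (by name: the statement is the Claim_ definition above) =====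
theorem act_to_binaire_spec : Claim_equal_act_to_binaire := by
  intro activation _
  unfold Spec_act_to_binaire
  rw [A_eq_horner, B_eq_horner]
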